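-- pv_equiv track=rewrite | github.com/darin-momayezi/CS1301 | HW11.py | songMystery
-- ===== SOURCE A (Python) =====
-- def songMystery(codedSong, songNames):
--     most = 0
--     newSong = ''
--     for song in songNames:
--         common = 0
--         for char in codedSong.lower():
--             if char in song.lower():
--                 common += 1
--         if common > most:
--             most = common
--             newSong = song
--     if len(newSong) == most and newSong != 'red':
--         return newSong.lower()
--     else:
--         return "I need more clues :("
-- ===== SOURCE B (Python) =====
-- def songMystery(codedSong, songNames):
--     cnt = {}
--     for ch in codedSong.lower():
--         cnt[ch] = cnt.get(ch, 0) + 1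
--     scores = [sum(cnt.get(ch, 0) for ch in set(song.lower())) for song in songNames]
--     most = max(scores, default=0)
--     if most > 0:
--         newSong = next(s for s, sc in zip(songNames, scores) if sc == most)
--     else:
--         newSong = ''
--     if len(newSong) == most and newSong != 'red':
--         return newSong.lower()
--     else:
--         return "I need more clues :("
-- ===== Notes on version B (the rewrite author's own statement) =====
-- stated objective: faster
-- what changed: B replaces A's online argmax loop with staged passes: it builds a character-frequency dict of codedSong.lower() once, scores each song by summing the dict counts over the song's own distinct characters (inverting the traversal: over set(song.lower()) instead of over codedSong), then selects the winner with max() plus a first-match scan over zip(songNames, scores).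
import Mathlib
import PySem

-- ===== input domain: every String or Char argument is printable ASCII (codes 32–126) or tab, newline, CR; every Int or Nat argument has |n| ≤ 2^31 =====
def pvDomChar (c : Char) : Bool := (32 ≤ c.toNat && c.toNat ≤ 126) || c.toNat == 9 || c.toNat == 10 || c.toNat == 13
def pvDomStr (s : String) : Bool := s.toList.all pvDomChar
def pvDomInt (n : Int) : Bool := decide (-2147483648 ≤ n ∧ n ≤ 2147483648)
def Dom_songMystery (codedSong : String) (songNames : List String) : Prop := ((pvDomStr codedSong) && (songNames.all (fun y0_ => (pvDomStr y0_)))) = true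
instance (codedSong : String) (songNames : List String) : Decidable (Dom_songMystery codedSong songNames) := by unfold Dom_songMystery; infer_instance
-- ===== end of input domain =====

-- B stages the computation: one frequency dict of codedSong.lower(), per-song scores summed over the
-- song's own distinct characters, then max() plus a first-match scan select the winner.

-- ===== PORT A =====
def songMystery (codedSong : String) (songNames : List String) : String :=
  let st := songNames.foldl (fun (p : Int × String) song =>
      let common := (PySem.Chars.lower codedSong.toList).foldl
        (fun common ch => if PySem.Chars.isIn [ch] (PySem.Chars.lower song.toList) then common + 1 else common)
        (0 : Int)
      if common > p.1 then (common, song) else p)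
    ((0 : Int), "")
  if PySem.Str.len st.2 = st.1 ∧ st.2 ≠ "red" then PySem.Str.lower st.2
  else "I need more clues :("

-- ===== PORT B =====
def songMystery_alt (codedSong : String) (songNames : List String) : String :=
  let cnt := PySem.Dict.counter (PySem.Chars.lower codedSong.toList)
  let scores := songNames.map (fun song =>
    (PySem.Set.ofList (PySem.Chars.lower song.toList)).foldl
      (fun a ch => a + cnt.getD ch 0) (0 : Int))
  let most := (PySem.List.max? scores (fun x => x)).getD 0
  let newSong :=
    if most > 0 then
      (((songNames.zip scores).find? (fun p => p.2 == most)).map Prod.fst).getD ""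
    else ""
  if PySem.Str.len newSong = most ∧ newSong ≠ "red" then PySem.Str.lower newSong
  else "I need more clues :("

-- ===== PRECONDITION & SPEC =====
def Spec_songMystery (codedSong : String) (songNames : List String) (out : String) : Prop := out = songMystery_alt codedSong songNames
instance (codedSong : String) (songNames : List String) (out : String) : Decidable (Spec_songMystery codedSong songNames out) := by unfold Spec_songMystery; infer_instance

-- ===== CLAIM (what is proved, stated in full; the proofs are below) =====
def Claim_equal_songMystery : Prop := ∀ (codedSong : String) (songNames : List String), Dom_songMystery codedSong songNames → Spec_songMystery codedSong songNames (songMystery codedSong songNames)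

-- ===== LEMMAS AND PROOFS =====

-- counting loop of A: fold with +1 is countP
theorem foldl_count_if (P : Char → Bool) (s : List Char) (a : Int) :
    s.foldl (fun c ch => if P ch then c + 1 else c) a = a + s.countP P := by
  induction s generalizing a with
  | nil => simp
  | cons x xs ih =>
    by_cases h : P x <;> simp [List.countP_cons, h, ih] <;> ring

theorem isIn_single (ch : Char) (t : List Char) :
    PySem.Chars.isIn [ch] t = decide (ch ∈ t) := by
  rcases h : PySem.Chars.isIn [ch] t with _ | _
  · rw [PySem.Chars.isIn_eq_false_iff] at h
    rw [List.singleton_infix_iff] at h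
    simp [h]
  · rw [PySem.Chars.isIn_iff_infix] at h
    rw [List.singleton_infix_iff] at h
    simp [h]

-- summing loop of B: fold with add is the sum of the mapped list
theorem foldl_sum (c : Char → Int) (l : List Char) (a : Int) :
    l.foldl (fun acc ch => acc + c ch) a = a + (l.map c).sum := by
  induction l generalizing a with
  | nil => simp
  | cons x xs ih => simp [ih]; ring

-- terms that are 0 may be filtered out of a sum
theorem sum_map_filter_not (P : Char → Bool) (c : Char → Int)
    (h0 : ∀ ch, P ch = false → c ch = 0) (l : List Char) :
    (l.map c).sum = ((l.filter P).map c).sum := by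
  induction l with
  | nil => rfl
  | cons x xs ih =>
    rcases h : P x with _ | _
    · simp [List.filter_cons, h, h0 x h, ih]
    · simp [List.filter_cons, h, ih]

theorem map_sum_natCast (f : Char → Nat) (l : List Char) :
    (l.map (fun x => (f x : Int))).sum = ((l.map f).sum : Int) := by
  induction l with
  | nil => simp
  | cons x xs ih => simp [ih]

-- B's per-song score equals A's per-song count
theorem score_eq (s t : List Char) :
    (PySem.Set.ofList t).foldl (fun a ch => a + (PySem.Dict.counter s).getD ch 0) (0 : Int)
      = (s.countP (fun ch => decide (ch ∈ t)) : Int) := by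
  rw [foldl_sum]
  have hgd : (fun ch => (PySem.Dict.counter s).getD ch 0) = (fun ch => (s.count ch : Int)) := by
    funext ch; exact PySem.Dict.getD_counter s ch
  rw [hgd, zero_add,
    sum_map_filter_not (fun ch => decide (ch ∈ s)) _
      (by intro ch h; simp at h; simp [List.count_eq_zero_of_not_mem h])]
  have hperm : ((PySem.Set.ofList t).filter (fun ch => decide (ch ∈ s))).Perm
      (s.dedup.filter (fun ch => decide (ch ∈ t))) := by
    refine (List.perm_ext_iff_of_nodup ((PySem.Set.nodup_ofList t).filter _)
      ((List.nodup_dedup s).filter _)).2 ?_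
    intro a
    simp [List.mem_filter, PySem.Set.mem_ofList, List.mem_dedup, and_comm]
  rw [List.Perm.sum_eq (hperm.map _), map_sum_natCast,
    List.sum_map_count_dedup_filter_eq_countP]

-- A's strict-improvement argmax loop, characterised as max + first hit
theorem fold_argmax (f : String → Int) (l : List String) (m : Int) (s : String) :
    l.foldl (fun p x => if f x > p.1 then (f x, x) else p) (m, s)
      = (if (l.map f).foldl max m > m
         then ((l.map f).foldl max m, ((l.find? (fun x => f x == (l.map f).foldl max m)).getD s))
         else (m, s)) := by
  induction l generalizing m s with
  | nil => simp
  | cons x t ih =>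
    by_cases hx : f x > m
    · have hmx : max m (f x) = f x := max_eq_right (le_of_lt hx)
      have hM : ((x :: t).map f).foldl max m = (t.map f).foldl max (f x) := by
        simp [hmx]
      by_cases hM1 : (t.map f).foldl max (f x) > f x
      · have hne : (f x == (t.map f).foldl max (f x)) = false := by
          simp; omega
        have hsome : (t.find? (fun y => f y == (t.map f).foldl max (f x))).isSome := by
          rcases PySem.List.foldl_max_mem (t.map f) (f x) with h | h
          · omega
          · rcases List.mem_map.1 h with ⟨y, hy, hfy⟩
            exact List.find?_isSome.2 ⟨y, hy, by simp [hfy]⟩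
        rcases Option.isSome_iff_exists.1 hsome with ⟨v, hv⟩
        simp only [List.foldl_cons, if_pos hx, ih, hM, List.find?_cons, hne]
        rw [if_pos hM1, if_pos (lt_trans hx hM1), hv]
        simp
      · have hle : f x ≤ (t.map f).foldl max (f x) := (PySem.List.le_foldl_max (t.map f) (f x)).1
        have heq : (t.map f).foldl max (f x) = f x := le_antisymm (not_lt.1 hM1) hle
        simp only [List.foldl_cons, if_pos hx, ih, hM, heq]
        simp [hx, List.find?_cons]
    · have hmx : max m (f x) = m := max_eq_left (not_lt.1 hx)
      have hM : ((x :: t).map f).foldl max m = (t.map f).foldl max m := by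
        simp [hmx]
      simp only [List.foldl_cons, if_neg hx, ih, hM]
      by_cases hgt : (t.map f).foldl max m > m
      · have hne : (f x == (t.map f).foldl max m) = false := by
          simp; omega
        simp [hgt, List.find?_cons, hne]
      · simp [hgt]

-- the common per-song score (proof-only helper)
def pvScoreF (c : String) (song : String) : Int :=
  ((PySem.Chars.lower c.toList).countP (fun ch => decide (ch ∈ PySem.Chars.lower song.toList)) : Int)

-- B's first-match scan over the zip equals the first-match scan over the names
theorem find?_zip_map (f : String → Int) (l : List String) (M : Int) (d : String) :
    (((l.zip (l.map f)).find? (fun p => p.2 == M)).map Prod.fst).getD d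
      = (l.find? (fun x => f x == M)).getD d := by
  induction l with
  | nil => rfl
  | cons x t ih => by_cases h : (f x == M) <;> simp [List.find?_cons, h, ih]

-- max(scores, default=0) is the running-max loop from 0 when scores are nonnegative
theorem max?_getD_nonneg (scores : List Int) (h : ∀ x ∈ scores, 0 ≤ x) :
    ((PySem.List.max? scores (fun x => x)).getD 0) = scores.foldl max 0 := by
  cases scores with
  | nil => rfl
  | cons x t =>
    rw [PySem.List.max?_id_cons]
    simp only [Option.getD_some, List.foldl_cons]
    rw [max_eq_right (h x List.mem_cons_self)]

-- ===== VERDICT (by name: the statement is the Claim_ definition above) =====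
theorem songMystery_spec : Claim_equal_songMystery := by
  intro c sn _
  unfold Spec_songMystery songMystery songMystery_alt
  have hAfun : (fun (p : Int × String) song =>
      let common := (PySem.Chars.lower c.toList).foldl
        (fun common ch => if PySem.Chars.isIn [ch] (PySem.Chars.lower song.toList) then common + 1 else common)
        (0 : Int)
      if common > p.1 then (common, song) else p)
    = (fun (p : Int × String) song =>
        if pvScoreF c song > p.1 then (pvScoreF c song, song) else p) := by
    funext p song
    have h1 : (fun (cc : Int) ch => if PySem.Chars.isIn [ch] (PySem.Chars.lower song.toList) then cc + 1 else cc)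
        = (fun (cc : Int) ch => if decide (ch ∈ PySem.Chars.lower song.toList) then cc + 1 else cc) := by
      funext cc ch; rw [isIn_single]
    simp only [h1, foldl_count_if, zero_add, pvScoreF]
  have hBfun : (fun song => (PySem.Set.ofList (PySem.Chars.lower song.toList)).foldl
      (fun a ch => a + (PySem.Dict.counter (PySem.Chars.lower c.toList)).getD ch 0) (0 : Int))
      = pvScoreF c := by
    funext song; rw [score_eq]; rfl
  simp only [hAfun, hBfun]
  rw [fold_argmax]
  have hnn : ∀ x ∈ sn.map (pvScoreF c), (0 : Int) ≤ x := by
    intro x hx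
    rcases List.mem_map.1 hx with ⟨y, _, rfl⟩
    exact Int.natCast_nonneg _
  rw [max?_getD_nonneg _ hnn, find?_zip_map]
  have hM0 : (0 : Int) ≤ (sn.map (pvScoreF c)).foldl max 0 :=
    (PySem.List.le_foldl_max (sn.map (pvScoreF c)) 0).1
  by_cases h : (sn.map (pvScoreF c)).foldl max 0 > 0
  · simp [h]
  · have hz : (sn.map (pvScoreF c)).foldl max 0 = 0 := le_antisymm (not_lt.1 h) hM0
    simp [h, hz]
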